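-- pv_equiv track=rewrite | github.com/Zabavin-Pavel/pw_inject | gui/styles.py | hotkey_to_full_format
-- ===== SOURCE A (Python) =====
-- def hotkey_to_full_format(short_hotkey: str) -> str:
--     """
--     Преобразовать короткий формат обратно в полный
--     +A → Shift+A
--     ^S → Ctrl+S
--     *T → Alt+T
--     ^+X → Ctrl+Shift+X
--     """
--     if not short_hotkey or short_hotkey == "-":
--         return short_hotkey
--
--     result = []
--     i = 0
--
--     while i < len(short_hotkey):
--         char = short_hotkey[i]
--
--         if char == 'Shift':
--             result.append('Shift')
--         elif char == 'Ctrl':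
--             result.append('Ctrl')
--         elif char == 'Alt':
--             result.append('Alt')
--         else:
--             # Обычная клавиша (может быть несколько символов, например F1)
--             key = char
--             j = i + 1
--             while j < len(short_hotkey) and short_hotkey[j] not in ['Shift', 'Ctrl', 'Alt']:
--                 key += short_hotkey[j]
--                 j += 1
--             result.append(key)
--             i = j - 1
--
--         i += 1
--
--     return '+'.join(result)
-- ===== SOURCE B (Python) =====
-- def hotkey_to_full_format(short_hotkey: str) -> str:
--     # A's modifier comparisons test a single character against multi-character
--     # names, so they never match: the whole string is collected as one "key"
--     # and joined back unchanged. The function is the identity.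
--     return short_hotkey
-- ===== Notes on version B (the rewrite author's own statement) =====
-- stated objective: simpler
-- what changed: A's scan-and-join loop (whose single-character comparisons against 'Shift'/'Ctrl'/'Alt' can never match) is replaced by a direct closed form that returns the input string unchanged.
import Mathlib
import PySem

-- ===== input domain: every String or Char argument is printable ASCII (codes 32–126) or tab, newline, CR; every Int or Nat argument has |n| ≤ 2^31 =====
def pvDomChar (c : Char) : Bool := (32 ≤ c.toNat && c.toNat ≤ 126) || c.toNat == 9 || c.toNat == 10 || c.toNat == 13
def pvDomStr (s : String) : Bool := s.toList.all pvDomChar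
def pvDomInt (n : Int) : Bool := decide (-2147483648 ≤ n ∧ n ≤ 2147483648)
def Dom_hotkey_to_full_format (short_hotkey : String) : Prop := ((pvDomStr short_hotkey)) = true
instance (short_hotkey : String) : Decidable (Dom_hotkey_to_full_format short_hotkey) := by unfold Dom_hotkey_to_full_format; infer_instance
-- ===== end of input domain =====

-- B replaces A's scan-and-join loop (whose single-character comparisons against the
-- multi-character modifier names 'Shift'/'Ctrl'/'Alt' can never match) by a direct
-- closed form returning the input string unchanged; objective: simpler.


-- ===== PORT A =====
-- inner while loop: collect characters into `key` until one equals a modifier name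
-- (it never can, being a single character); returns (key, j)
def pvInnerA (cs : List Char) (j : Nat) (key : String) : String × Nat :=
  if h : j < cs.length then
    if String.singleton cs[j] == "Shift" || String.singleton cs[j] == "Ctrl" || String.singleton cs[j] == "Alt"
    then (key, j)
    else pvInnerA cs (j+1) (key.push cs[j])
  else (key, j)
termination_by cs.length - j

-- needed by pvOuterA's decreasing_by: the inner loop never moves j backwards
theorem pvInnerA_ge (cs : List Char) (j : Nat) (key : String) : j ≤ (pvInnerA cs j key).2 := by
  unfold pvInnerA
  split
  · split
    · simp
    · exact le_trans (Nat.le_succ j) (pvInnerA_ge cs (j+1) _)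
  · simp
termination_by cs.length - j

-- outer while loop over i with the result accumulator; i = j - 1 then i += 1 gives i = j
def pvOuterA (cs : List Char) (i : Nat) (result : List String) : List String :=
  if h : i < cs.length then
    if String.singleton cs[i] == "Shift" then pvOuterA cs (i+1) (result ++ ["Shift"])
    else if String.singleton cs[i] == "Ctrl" then pvOuterA cs (i+1) (result ++ ["Ctrl"])
    else if String.singleton cs[i] == "Alt" then pvOuterA cs (i+1) (result ++ ["Alt"])
    else
      let r := pvInnerA cs (i+1) (String.singleton cs[i])
      pvOuterA cs r.2 (result ++ [r.1])
  else result
termination_by cs.length - i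
decreasing_by
  · omega
  · omega
  · omega
  · have := pvInnerA_ge cs (i+1) (String.singleton cs[i]); omega

def hotkey_to_full_format (short_hotkey : String) : String :=
  if short_hotkey = "" ∨ short_hotkey = "-" then short_hotkey
  else PySem.Str.join "+" (pvOuterA short_hotkey.toList 0 [])

-- ===== PORT B =====
def hotkey_to_full_format_alt (short_hotkey : String) : String := short_hotkey

-- ===== PRECONDITION & SPEC =====
def Spec_hotkey_to_full_format (short_hotkey : String) (out : String) : Prop := out = hotkey_to_full_format_alt short_hotkey
instance (short_hotkey : String) (out : String) : Decidable (Spec_hotkey_to_full_format short_hotkey out) := by unfold Spec_hotkey_to_full_format; infer_instance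

-- ===== CLAIM (what is proved, stated in full; the proofs are below) =====
def Claim_equal_hotkey_to_full_format : Prop := ∀ (short_hotkey : String), Dom_hotkey_to_full_format short_hotkey → Spec_hotkey_to_full_format short_hotkey (hotkey_to_full_format short_hotkey)

-- ===== LEMMAS AND PROOFS =====

-- a one-character string never equals a string of another length
theorem pv_single_ne (c : Char) (t : String) (ht : t.toList.length ≠ 1) : (String.singleton c == t) = false := by
  rw [beq_eq_false_iff_ne]
  intro h
  have h2 : (String.singleton c).toList.length = t.toList.length := by rw [h]
  rw [String.toList_singleton] at h2
  simp only [List.length_singleton] at h2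
  omega

theorem pv_not_shift (c : Char) : (String.singleton c == "Shift") = false := pv_single_ne c _ (by decide)
theorem pv_not_ctrl (c : Char) : (String.singleton c == "Ctrl") = false := pv_single_ne c _ (by decide)
theorem pv_not_alt (c : Char) : (String.singleton c == "Alt") = false := pv_single_ne c _ (by decide)

-- the inner loop always swallows the rest of the string
theorem pvInnerA_eq (cs : List Char) (j : Nat) (key : String) (hj : j ≤ cs.length) :
    pvInnerA cs j key = (String.ofList (key.toList ++ cs.drop j), cs.length) := by
  unfold pvInnerA
  split
  · rename_i h
    rw [pv_not_shift, pv_not_ctrl, pv_not_alt, if_neg (by decide)]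
    rw [pvInnerA_eq cs (j+1) (key.push cs[j]) h]
    have hdrop : cs.drop j = cs[j] :: cs.drop (j+1) := List.drop_eq_getElem_cons h
    rw [hdrop, Prod.mk.injEq]
    refine ⟨congrArg String.ofList ?_, rfl⟩
    rw [String.toList_push, List.append_assoc, List.singleton_append]
  · rename_i h
    have hj' : j = cs.length := by omega
    subst hj'
    simp [List.drop_length]
termination_by cs.length - j

-- the outer loop therefore runs exactly once on a nonempty string
theorem pvOuterA_eq (cs : List Char) (hcs : cs ≠ []) :
    pvOuterA cs 0 [] = [String.ofList cs] := by
  have hlen : 0 < cs.length := List.length_pos_iff.mpr hcs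
  unfold pvOuterA
  rw [dif_pos hlen, pv_not_shift, pv_not_ctrl, pv_not_alt, if_neg (by decide),
    if_neg (by decide), if_neg (by decide)]
  rw [pvInnerA_eq cs 1 (String.singleton cs[0]) (by omega)]
  have h0 : cs = cs[0] :: cs.drop 1 := by simpa using List.drop_eq_getElem_cons (l := cs) (i := 0) hlen
  unfold pvOuterA
  simp only [lt_irrefl, dif_neg, not_false_iff, List.nil_append,
    String.toList_singleton, List.singleton_append, ← h0]

-- '+'.join of a one-element list is that element
theorem pv_join_single (s : String) : PySem.Str.join "+" [s] = s := by
  apply String.toList_inj.mp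
  simp [PySem.Str.toList_join, PySem.Chars.join_singleton]

-- ===== VERDICT (by name: the statement is the Claim_ definition above) =====
theorem hotkey_to_full_format_spec : Claim_equal_hotkey_to_full_format := by
  intro s _
  unfold Spec_hotkey_to_full_format hotkey_to_full_format hotkey_to_full_format_alt
  split
  · rfl
  · rename_i h
    have hne : s.toList ≠ [] := by
      intro hnil
      exact h (Or.inl (String.toList_inj.mp (by simp [hnil])))
    rw [pvOuterA_eq s.toList hne, pv_join_single]
    exact String.toList_inj.mp (by simp)
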